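-- pv_equiv track=rewrite | github.com/pthomasfournet/nytspellingbeesolver | src/spelling_bee_solver/intelligent_word_filter.py | _has_repeated_syllables
-- ===== SOURCE A (Python) =====
-- def _has_repeated_syllables(word: str) -> bool:
--     """Detect words with excessively repeated syllables."""
--     if len(word) < 6:
--         return False
--
--     # Check for simple repeated patterns
--     for length in [2, 3, 4]:
--         for i in range(len(word) - length):
--             pattern = word[i:i + length]
--             # Check if this pattern repeats multiple times
--             if len(pattern) > 0:
--                 repeat_count = 1
--                 pos = i + length
--                 while pos + length <= len(word) and word[pos:pos + length] == pattern:
--                     repeat_count += 1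
--                     pos += length
--
--                 # If we found 3+ repetitions of a 2-3 char pattern, it's likely nonsense
--                 if repeat_count >= 3 and length <= 3:
--                     return True
--
--                 # Or 2+ repetitions of a longer pattern
--                 if repeat_count >= 2 and length >= 4:
--                     return True
--
--     # Special cases for known nonsense patterns
--     nonsense_words = ['anapanapa', 'cacanapa', 'papapapa', 'nanana', 'lalala']
--     if word.lower() in nonsense_words:
--         return True
--
--     # Check for alternating syllables that create nonsense
--     if len(word) >= 8:
--         # Look for ABAB... or ABCABC... patterns
--         for syllable_len in [2, 3]:
--             if len(word) % syllable_len == 0: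
--                 syllables = [word[i:i+syllable_len] for i in range(0, len(word), syllable_len)]
--                 # Check if it's just repetitions of 2-3 syllables
--                 if len(set(syllables)) <= 2 and len(syllables) >= 3:
--                     return True
--
--     return False
-- ===== SOURCE B (Python) =====
-- def _has_repeated_syllables(word: str) -> bool:
--     """Detect words with excessively repeated syllables (linear run-scan)."""
--     n = len(word)
--     if n < 6:
--         return False
--
--     # One linear pass per offset d: a block of the same length-d pattern
--     # repeated k times is exactly a run of (k-1)*d consecutive positions j
--     # with word[j] == word[j + d].  3 reps of a 2/3-char pattern need a run
--     # of 2*d; 2 reps of a 4-char pattern need a run of 4.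
--     for d, need in ((2, 4), (3, 6), (4, 4)):
--         run = 0
--         for j in range(n - d):
--             if word[j] == word[j + d]:
--                 run += 1
--                 if run >= need:
--                     return True
--             else:
--                 run = 0
--
--     if word.lower() in {'anapanapa', 'cacanapa', 'papapapa', 'nanana', 'lalala'}:
--         return True
--
--     # Alternating-syllable check: chunk the word and count distinct chunks
--     # incrementally, stopping as soon as a third distinct chunk appears.
--     if n >= 8:
--         for d in (2, 3):
--             if n % d == 0:
--                 seen = set()
--                 for i in range(0, n, d):
--                     seen.add(word[i:i + d])
--                     if len(seen) > 2:
--                         break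
--                 if len(seen) <= 2:
--                     return True
--
--     return False
-- ===== Notes on version B (the rewrite author's own statement) =====
-- stated objective: faster
-- what changed: Replaces A's per-position pattern-slicing with inner repeat-counting while-loops by a single linear run-scan per offset d counting consecutive positions with word[j]==word[j+d], and replaces the build-all-chunks-then-set alternating check by an incremental distinct-chunk count with early exit.
import Mathlib
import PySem

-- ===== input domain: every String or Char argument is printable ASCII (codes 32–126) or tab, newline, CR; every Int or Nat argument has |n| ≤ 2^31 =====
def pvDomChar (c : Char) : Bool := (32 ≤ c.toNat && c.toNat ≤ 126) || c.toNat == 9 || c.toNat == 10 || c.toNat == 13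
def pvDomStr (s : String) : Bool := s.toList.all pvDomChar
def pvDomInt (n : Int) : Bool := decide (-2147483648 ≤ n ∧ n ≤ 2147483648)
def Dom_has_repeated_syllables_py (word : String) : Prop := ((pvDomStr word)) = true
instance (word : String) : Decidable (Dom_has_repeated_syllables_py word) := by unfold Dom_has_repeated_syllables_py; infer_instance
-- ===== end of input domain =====

-- B replaces A's per-position slice-and-count repeat detection by one linear run-scan per
-- offset d (counting consecutive j with word[j] == word[j+d]) and the chunk-set check by an
-- incremental distinct-chunk count with early exit; objective: faster by constant factor.

-- ===== PORT A =====
def pvNonsense : List (List Char) :=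
  ["anapanapa".toList, "cacanapa".toList, "papapapa".toList, "nanana".toList, "lalala".toList]

-- the inner 'while word[pos:pos+length] == pattern' counter; '0 < d' in the guard is a
-- totality guard only (A always calls it with d ∈ {2,3,4})
def pvCountReps (w pat : List Char) (d : Nat) (pos cnt : Nat) : Nat :=
  if h : 0 < d ∧ pos + d ≤ w.length ∧ (w.drop pos).take d = pat then
    pvCountReps w pat d (pos + d) (cnt + 1)
  else cnt
termination_by w.length - pos
decreasing_by omega

def pvPhaseA (w : List Char) (d : Nat) : Bool :=
  (List.range (w.length - d)).any (fun i =>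
    let pattern := (w.drop i).take d
    if 0 < pattern.length then
      let rc := pvCountReps w pattern d (i + d) 1
      decide ((3 ≤ rc ∧ d ≤ 3) ∨ (2 ≤ rc ∧ 4 ≤ d))
    else false)

def pvSyllables (w : List Char) (sl : Nat) : List (List Char) :=
  (PySem.List.pyRange 0 (w.length : Int) (sl : Int)).map (fun i => (w.drop i.toNat).take sl)

def pvAltA (w : List Char) : Bool :=
  [2, 3].any (fun sl =>
    if w.length % sl = 0 then
      let sylls := pvSyllables w sl
      decide ((PySem.Set.ofList sylls).length ≤ 2 ∧ 3 ≤ sylls.length)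
    else false)

def has_repeated_syllables_py (word : String) : Bool :=
  let w := word.toList
  if w.length < 6 then false
  else if [2, 3, 4].any (fun length => pvPhaseA w length) then true
  else if pvNonsense.contains (PySem.Chars.lower w) then true
  else if 8 ≤ w.length then pvAltA w
  else false

-- ===== PORT B =====
def pvRunStep (w : List Char) (d need : Nat) (st : Bool × Nat) (j : Nat) : Bool × Nat :=
  if st.1 then st
  else if w[j]? == w[j + d]? then (decide (need ≤ st.2 + 1), st.2 + 1)
  else (false, 0)

def pvRunScan (w : List Char) (d need : Nat) : Bool :=
  ((List.range (w.length - d)).foldl (pvRunStep w d need) (false, 0)).1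

def pvChunkStep (w : List Char) (sl : Nat) (s : PySem.Set (List Char)) (i : Int) : PySem.Set (List Char) :=
  if 2 < s.length then s else PySem.Set.add s ((w.drop i.toNat).take sl)

def pvAltScanB (w : List Char) (sl : Nat) : Bool :=
  decide (((PySem.List.pyRange 0 (w.length : Int) (sl : Int)).foldl (pvChunkStep w sl)
      PySem.Set.empty).length ≤ 2)

def has_repeated_syllables_py_alt (word : String) : Bool :=
  let w := word.toList
  if w.length < 6 then false
  else if [(2, 4), (3, 6), (4, 4)].any (fun p => pvRunScan w p.1 p.2) then true
  else if PySem.Set.contains (PySem.Set.ofList pvNonsense) (PySem.Chars.lower w) then true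
  else if 8 ≤ w.length then
    [2, 3].any (fun sl => if w.length % sl = 0 then pvAltScanB w sl else false)
  else false

-- ===== PRECONDITION & SPEC =====
def Spec_has_repeated_syllables_py (word : String) (out : Bool) : Prop := out = has_repeated_syllables_py_alt word
instance (word : String) (out : Bool) : Decidable (Spec_has_repeated_syllables_py word out) := by unfold Spec_has_repeated_syllables_py; infer_instance

-- ===== CLAIM (what is proved, stated in full; the proofs are below) =====
def Claim_equal_has_repeated_syllables_py : Prop := ∀ (word : String), Dom_has_repeated_syllables_py word → Spec_has_repeated_syllables_py word (has_repeated_syllables_py word)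

-- ===== LEMMAS AND PROOFS =====

-- match predicate at offset d
def pvP (w : List Char) (d j : Nat) : Bool := w[j]? == w[j + d]?

-- 'a run of `need` consecutive matches ends at or before position m'
def pvFound (w : List Char) (d need m : Nat) : Prop :=
  ∃ i, i + need ≤ m ∧ ∀ k < need, pvP w d (i + k) = true

-- length of the maximal run of matches ending at m
def pvRunLen (w : List Char) (d : Nat) : Nat → Nat
  | 0 => 0
  | m + 1 => if pvP w d m then pvRunLen w d m + 1 else 0

theorem pvRunLen_le (w : List Char) (d : Nat) : ∀ m, pvRunLen w d m ≤ m := by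
  intro m
  induction m with
  | zero => simp [pvRunLen]
  | succ m ih => simp only [pvRunLen]; split <;> omega

theorem pvRunLen_prop (w : List Char) (d : Nat) :
    ∀ m, ∀ k < pvRunLen w d m, pvP w d (m - 1 - k) = true := by
  intro m
  induction m with
  | zero => simp [pvRunLen]
  | succ m ih =>
    intro k hk
    simp only [pvRunLen] at hk
    by_cases hq : pvP w d m = true
    · rw [if_pos hq] at hk
      rcases k with _ | k'
      · simpa using hq
      · have := ih k' (by omega)
        have he : m + 1 - 1 - (k' + 1) = m - 1 - k' := by omega
        rw [he]; exact this
    · rw [if_neg hq] at hk; omega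

theorem pvRunLen_ge (w : List Char) (d : Nat) :
    ∀ m r, r ≤ m → (∀ k < r, pvP w d (m - 1 - k) = true) → r ≤ pvRunLen w d m := by
  intro m
  induction m with
  | zero => intro r hr _; omega
  | succ m ih =>
    intro r hr hall
    rcases r with _ | r'
    · omega
    · have hm : pvP w d m = true := by simpa using hall 0 (by omega)
      simp only [pvRunLen, if_pos hm]
      have : r' ≤ pvRunLen w d m := by
        apply ih r' (by omega)
        intro k hk
        have := hall (k + 1) (by omega)
        have he : m + 1 - 1 - (k + 1) = m - 1 - k := by omega
        rwa [he] at this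
      omega

theorem pvScan_invariant (w : List Char) (d need : Nat) (hneed : 0 < need) (m : Nat) :
    (((List.range m).foldl (pvRunStep w d need) (false, 0)).1 = true ↔ pvFound w d need m) ∧
    (((List.range m).foldl (pvRunStep w d need) (false, 0)).1 = false →
      ((List.range m).foldl (pvRunStep w d need) (false, 0)).2 = pvRunLen w d m ∧
        pvRunLen w d m < need) := by
  induction m with
  | zero =>
    constructor
    · simp only [List.range_zero, List.foldl_nil]
      constructor
      · intro h; cases h
      · rintro ⟨i, hi, -⟩; omega
    · intro _
      simp only [List.range_zero, List.foldl_nil]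
      exact ⟨rfl, hneed⟩
  | succ m ih =>
    rw [List.range_succ, List.foldl_append, List.foldl_cons, List.foldl_nil]
    set st := (List.range m).foldl (pvRunStep w d need) (false, 0) with hst
    by_cases h1 : st.1 = true
    · have hF : pvFound w d need m := ih.1.mp h1
      have hstep : pvRunStep w d need st m = st := by simp [pvRunStep, h1]
      rw [hstep]
      refine ⟨⟨fun _ => ?_, fun _ => h1⟩, fun hc => by rw [h1] at hc; cases hc⟩
      obtain ⟨i, hi, hw⟩ := hF
      exact ⟨i, by omega, hw⟩
    · have h1' : st.1 = false := by cases hb : st.1 <;> simp_all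
      obtain ⟨hrl, hlt⟩ := ih.2 h1'
      by_cases hq : pvP w d m = true
      · have hq' : (w[m]? == w[m + d]?) = true := hq
        have hstep : pvRunStep w d need st m =
            (decide (need ≤ st.2 + 1), st.2 + 1) := by
          simp [pvRunStep, h1', hq']
        rw [hstep]
        have hrl1 : pvRunLen w d (m + 1) = pvRunLen w d m + 1 := by
          simp [pvRunLen, hq]
        constructor
        · simp only [decide_eq_true_eq]
          constructor
          · intro hge
            have hle := pvRunLen_le w d (m + 1)
            have hrn : pvRunLen w d (m + 1) = need := by omega
            refine ⟨m + 1 - need, by omega, fun k hk => ?_⟩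
            have := pvRunLen_prop w d (m + 1) (need - 1 - k) (by omega)
            have he : m + 1 - 1 - (need - 1 - k) = m + 1 - need + k := by omega
            rwa [he] at this
          · rintro ⟨i, hi, hw⟩
            by_cases him : i + need ≤ m
            · exact absurd (ih.1.mpr ⟨i, him, hw⟩) (by simp [h1'])
            · have hieq : i + need = m + 1 := by omega
              have hge : need ≤ pvRunLen w d (m + 1) := by
                apply pvRunLen_ge w d (m + 1) need (by omega)
                intro k hk
                have := hw (need - 1 - k) (by omega)
                have he : i + (need - 1 - k) = m + 1 - 1 - k := by omega
                rwa [he] at this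
              omega
        · intro hc
          simp only [decide_eq_false_iff_not, not_le] at hc
          exact ⟨by omega, by omega⟩
      · have hq' : ¬ ((w[m]? == w[m + d]?) = true) := hq
        have hstep : pvRunStep w d need st m = (false, 0) := by
          simp [pvRunStep, h1', hq']
        rw [hstep]
        have hrl1 : pvRunLen w d (m + 1) = 0 := by simp [pvRunLen, hq]
        constructor
        · constructor
          · intro h; cases h
          · rintro ⟨i, hi, hw⟩
            by_cases him : i + need ≤ m
            · exact absurd (ih.1.mpr ⟨i, him, hw⟩) (by simp [h1'])
            · have hieq : i + need = m + 1 := by omega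
              have := hw (need - 1) (by omega)
              have he : i + (need - 1) = m := by omega
              rw [he] at this
              exact absurd this hq
        · intro _; omega

theorem pvRunScan_iff (w : List Char) (d need : Nat) (hneed : 0 < need) :
    pvRunScan w d need = true ↔ pvFound w d need (w.length - d) := by
  unfold pvRunScan
  exact (pvScan_invariant w d need hneed (w.length - d)).1

theorem pvCountReps_ge (w pat : List Char) (d pos cnt : Nat) :
    cnt ≤ pvCountReps w pat d pos cnt := by
  fun_induction pvCountReps <;> omega

theorem pvCountReps_one (w pat : List Char) (d pos cnt : Nat) (hd : 0 < d) :
    cnt + 1 ≤ pvCountReps w pat d pos cnt ↔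
      pos + d ≤ w.length ∧ (w.drop pos).take d = pat := by
  rw [pvCountReps]
  split
  · rename_i h
    constructor
    · intro _; exact ⟨h.2.1, h.2.2⟩
    · intro _
      have := pvCountReps_ge w pat d (pos + d) (cnt + 1)
      omega
  · rename_i h
    constructor
    · intro hc; omega
    · intro hc; exact absurd ⟨hd, hc.1, hc.2⟩ h

theorem pvCountReps_two (w pat : List Char) (d pos cnt : Nat) (hd : 0 < d) :
    cnt + 2 ≤ pvCountReps w pat d pos cnt ↔
      (pos + d ≤ w.length ∧ (w.drop pos).take d = pat) ∧
      (pos + d + d ≤ w.length ∧ (w.drop (pos + d)).take d = pat) := by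
  rw [pvCountReps]
  split
  · rename_i h
    have := pvCountReps_one w pat d (pos + d) (cnt + 1) hd
    constructor
    · intro hc
      exact ⟨⟨h.2.1, h.2.2⟩, (this.mp (by omega))⟩
    · intro hc
      have h2 := this.mpr hc.2
      omega
  · rename_i h
    constructor
    · intro hc; omega
    · intro hc; exact absurd ⟨hd, hc.1.1, hc.1.2⟩ h

theorem pvSliceEq (w : List Char) (d a b : Nat) :
    (w.drop a).take d = (w.drop b).take d ↔ ∀ k < d, w[a + k]? = w[b + k]? := by
  constructor
  · intro h k hk
    have := congrArg (fun l => l[k]?) h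
    simpa [List.getElem?_take, List.getElem?_drop, hk] using this
  · intro h
    apply List.ext_getElem?_iff.mpr
    intro i
    simp only [List.getElem?_take, List.getElem?_drop]
    by_cases hi : i < d
    · rw [if_pos hi, if_pos hi]; exact h i hi
    · rw [if_neg hi, if_neg hi]

theorem pvPhase23_iff (w : List Char) (d : Nat) (hd : 0 < d) (hd3 : d ≤ 3) :
    pvPhaseA w d = true ↔ pvFound w d (2 * d) (w.length - d) := by
  unfold pvPhaseA
  rw [List.any_eq_true]
  constructor
  · rintro ⟨i, hi, hbody⟩
    rw [List.mem_range] at hi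
    by_cases hlen : 0 < ((w.drop i).take d).length
    case neg => simp only [if_neg hlen, Bool.false_eq_true] at hbody
    simp only [if_pos hlen, decide_eq_true_eq] at hbody
    have h3 : 3 ≤ pvCountReps w ((w.drop i).take d) d (i + d) 1 := by
      rcases hbody with ⟨h, _⟩ | ⟨_, h4⟩
      · exact h
      · omega
    obtain ⟨⟨hb1, hs1⟩, ⟨hb2, hs2⟩⟩ :=
      (pvCountReps_two w ((w.drop i).take d) d (i + d) 1 hd).mp (by omega)
    refine ⟨i, by omega, ?_⟩
    have hp1 := (pvSliceEq w d (i + d) i).mp hs1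
    have hp2 := (pvSliceEq w d (i + d + d) i).mp hs2
    intro k hk
    rw [pvP, beq_iff_eq]
    by_cases hkd : k < d
    · rw [show i + k + d = i + d + k by omega]
      exact (hp1 k hkd).symm
    · have h1 := hp1 (k - d) (by omega)
      have h2 := hp2 (k - d) (by omega)
      rw [show i + k = i + d + (k - d) by omega,
        show i + d + (k - d) + d = i + d + d + (k - d) by omega, h1, ← h2]
  · rintro ⟨i, hi, hwin⟩
    refine ⟨i, by rw [List.mem_range]; omega, ?_⟩
    have hlen : 0 < ((w.drop i).take d).length := by
      simp only [List.length_take, List.length_drop]; omega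
    rw [if_pos hlen, decide_eq_true_eq]
    left
    refine ⟨?_, hd3⟩
    have hQ : ∀ k < 2 * d, w[i + k]? = w[i + k + d]? := by
      intro k hk
      have := hwin k hk
      rwa [pvP, beq_iff_eq] at this
    have h3 := (pvCountReps_two w ((w.drop i).take d) d (i + d) 1 hd).mpr
      ⟨⟨by omega, ?_⟩, by omega, ?_⟩
    · omega
    · apply (pvSliceEq w d (i + d) i).mpr
      intro k hk
      rw [show i + d + k = i + k + d by omega]
      exact (hQ k (by omega)).symm
    · apply (pvSliceEq w d (i + d + d) i).mpr
      intro k hk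
      have e1 := hQ k (by omega)
      have e2 := hQ (k + d) (by omega)
      rw [show i + d + d + k = i + (k + d) + d by omega, ← e2,
        show i + (k + d) = i + k + d by omega, ← e1]

theorem pvPhase4_iff (w : List Char) :
    pvPhaseA w 4 = true ↔ pvFound w 4 4 (w.length - 4) := by
  unfold pvPhaseA
  rw [List.any_eq_true]
  constructor
  · rintro ⟨i, hi, hbody⟩
    rw [List.mem_range] at hi
    by_cases hlen : 0 < ((w.drop i).take 4).length
    case neg => simp only [if_neg hlen, Bool.false_eq_true] at hbody
    simp only [if_pos hlen, decide_eq_true_eq] at hbody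
    have h2 : 2 ≤ pvCountReps w ((w.drop i).take 4) 4 (i + 4) 1 := by
      rcases hbody with ⟨_, h3⟩ | ⟨h, _⟩
      · omega
      · exact h
    obtain ⟨hb1, hs1⟩ :=
      (pvCountReps_one w ((w.drop i).take 4) 4 (i + 4) 1 (by omega)).mp (by omega)
    refine ⟨i, by omega, ?_⟩
    have hp1 := (pvSliceEq w 4 (i + 4) i).mp hs1
    intro k hk
    rw [pvP, beq_iff_eq, show i + k + 4 = i + 4 + k by omega]
    exact (hp1 k hk).symm
  · rintro ⟨i, hi, hwin⟩
    refine ⟨i, by rw [List.mem_range]; omega, ?_⟩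
    have hlen : 0 < ((w.drop i).take 4).length := by
      simp only [List.length_take, List.length_drop]; omega
    rw [if_pos hlen, decide_eq_true_eq]
    right
    refine ⟨?_, by omega⟩
    have h2 := (pvCountReps_one w ((w.drop i).take 4) 4 (i + 4) 1 (by omega)).mpr
      ⟨by omega, ?_⟩
    · omega
    apply (pvSliceEq w 4 (i + 4) i).mpr
    intro k hk
    have := hwin k hk
    rw [pvP, beq_iff_eq] at this
    rw [show i + 4 + k = i + k + 4 by omega]
    exact this.symm

theorem pvPhase_eq_runScan_23 (w : List Char) (d : Nat) (hd : 0 < d) (hd3 : d ≤ 3) :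
    pvPhaseA w d = pvRunScan w d (2 * d) := by
  apply Bool.coe_iff_coe.mp
  exact (pvPhase23_iff w d hd hd3).trans (pvRunScan_iff w d (2 * d) (by omega)).symm

theorem pvPhase_eq_runScan_4 (w : List Char) :
    pvPhaseA w 4 = pvRunScan w 4 4 := by
  apply Bool.coe_iff_coe.mp
  exact (pvPhase4_iff w).trans (pvRunScan_iff w 4 4 (by omega)).symm

theorem pvSetAddLen (s : PySem.Set (List Char)) (x : List Char) :
    s.length ≤ (PySem.Set.add s x).length := by
  rw [PySem.Set.add_eq_ite]
  split <;> simp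

theorem pvSetUpdateLen (l : List (List Char)) (s : PySem.Set (List Char)) :
    s.length ≤ (PySem.Set.update s l).length := by
  induction l generalizing s with
  | nil => rw [PySem.Set.update_nil]
  | cons x t ih => rw [PySem.Set.update_cons]; exact le_trans (pvSetAddLen s x) (ih _)

theorem pvChunkFoldLen (w : List Char) (sl : Nat) (l : List Int) (s : PySem.Set (List Char)) :
    s.length ≤ (l.foldl (pvChunkStep w sl) s).length := by
  induction l generalizing s with
  | nil => simp
  | cons x t ih =>
    simp only [List.foldl_cons]
    refine le_trans ?_ (ih _)
    unfold pvChunkStep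
    split
    · exact le_rfl
    · exact pvSetAddLen s _

theorem pvChunkFold_iff (w : List Char) (sl : Nat) (l : List Int) (s : PySem.Set (List Char)) :
    ((l.foldl (pvChunkStep w sl) s).length ≤ 2 ↔
      (PySem.Set.update s (l.map (fun i => (w.drop i.toNat).take sl))).length ≤ 2) := by
  induction l generalizing s with
  | nil => rw [List.foldl_nil, List.map_nil, PySem.Set.update_nil]
  | cons x t ih =>
    rw [List.foldl_cons, List.map_cons, PySem.Set.update_cons]
    by_cases h2 : 2 < s.length
    · apply iff_of_false
      · rw [show pvChunkStep w sl s x = s from by unfold pvChunkStep; rw [if_pos h2]]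
        have := pvChunkFoldLen w sl t s
        omega
      · have ha := pvSetAddLen s ((w.drop x.toNat).take sl)
        have := pvSetUpdateLen (t.map (fun i => (w.drop i.toNat).take sl))
          (PySem.Set.add s ((w.drop x.toNat).take sl))
        omega
    · rw [show pvChunkStep w sl s x = PySem.Set.add s ((w.drop x.toNat).take sl) from by
        unfold pvChunkStep; rw [if_neg h2]]
      exact ih _

theorem pvAltScanB_eq (w : List Char) (sl : Nat) :
    pvAltScanB w sl = decide ((PySem.Set.ofList (pvSyllables w sl)).length ≤ 2) := by
  unfold pvAltScanB pvSyllables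
  rw [decide_eq_decide]
  rw [pvChunkFold_iff]
  rw [show (PySem.Set.empty : PySem.Set (List Char)) = [] from rfl, PySem.Set.update_nil_left]

theorem pvAltBody_eq (w : List Char) (sl : Nat) (h8 : 8 ≤ w.length) (hsl : sl = 2 ∨ sl = 3) :
    (if w.length % sl = 0 then
      decide ((PySem.Set.ofList (pvSyllables w sl)).length ≤ 2 ∧ 3 ≤ (pvSyllables w sl).length)
     else false) =
    (if w.length % sl = 0 then pvAltScanB w sl else false) := by
  by_cases hm : w.length % sl = 0
  · rw [if_pos hm, if_pos hm, pvAltScanB_eq]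
    have hlen : 3 ≤ (pvSyllables w sl).length := by
      unfold pvSyllables
      have hslpos : (0 : Int) < (sl : Int) := by
        rcases hsl with h | h <;> subst h <;> norm_num
      rw [List.length_map, PySem.List.pyRange_of_pos 0 (w.length : Int) hslpos,
        List.length_map, List.length_range]
      rw [if_pos (by exact_mod_cast (by omega : (0 : Int) < (w.length : Int)))]
      rcases hsl with h | h <;> subst h <;> push_cast <;> omega
    rw [decide_eq_decide]
    constructor
    · intro h; exact h.1
    · intro h; exact ⟨h, hlen⟩
  · rw [if_neg hm, if_neg hm]


theorem pvAlt_eq (w : List Char) (h8 : 8 ≤ w.length) :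
    pvAltA w = [2, 3].any (fun sl => if w.length % sl = 0 then pvAltScanB w sl else false) := by
  unfold pvAltA
  apply PySem.List.any_congr_mem
  intro sl hsl
  have h23 : sl = 2 ∨ sl = 3 := by simpa using hsl
  exact pvAltBody_eq w sl h8 h23

-- ===== VERDICT (by name: the statement is the Claim_ definition above) =====
theorem has_repeated_syllables_py_spec : Claim_equal_has_repeated_syllables_py := by
  intro word _
  unfold Spec_has_repeated_syllables_py
  simp only [has_repeated_syllables_py, has_repeated_syllables_py_alt]
  set w := word.toList with hw
  by_cases h6 : w.length < 6
  · rw [if_pos h6, if_pos h6]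
  · rw [if_neg h6, if_neg h6]
    have e2 : pvPhaseA w 2 = pvRunScan w 2 4 := by
      have := pvPhase_eq_runScan_23 w 2 (by omega) (by omega)
      simpa using this
    have e3 : pvPhaseA w 3 = pvRunScan w 3 6 := by
      have := pvPhase_eq_runScan_23 w 3 (by omega) (by omega)
      simpa using this
    have e4 := pvPhase_eq_runScan_4 w
    have hmain : ([2, 3, 4].any (fun length => pvPhaseA w length))
        = ([((2 : Nat), (4 : Nat)), (3, 6), (4, 4)].any (fun p => pvRunScan w p.1 p.2)) := by
      simp only [List.any_cons, List.any_nil, Bool.or_false]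
      rw [e2, e3, e4]
    rw [hmain]
    by_cases hm : ([((2 : Nat), (4 : Nat)), (3, 6), (4, 4)].any (fun p => pvRunScan w p.1 p.2)) = true
    · rw [if_pos hm, if_pos hm]
    · rw [if_neg hm, if_neg hm]
      have hnon : (pvNonsense.contains (PySem.Chars.lower w))
          = PySem.Set.contains (PySem.Set.ofList pvNonsense) (PySem.Chars.lower w) := by
        rw [PySem.Set.contains_eq_listContains,
          PySem.Set.ofList_eq_self_of_nodup _ (by decide)]
      rw [hnon]
      by_cases hn : PySem.Set.contains (PySem.Set.ofList pvNonsense) (PySem.Chars.lower w) = true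
      · rw [if_pos hn, if_pos hn]
      · rw [if_neg hn, if_neg hn]
        by_cases h8 : 8 ≤ w.length
        · rw [if_pos h8, if_pos h8]
          exact pvAlt_eq w h8
        · rw [if_neg h8, if_neg h8]
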